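-- pv_equiv track=rewrite | github.com/KevinNitroG/My-Scripts | scripts/Subtitle Fix Syntax/Subtitle Fix Syntax.py | remove_double_space
-- ===== SOURCE A (Python) =====
-- def remove_double_space(arr, subtitle_index_arr):
--     modified_arr = []
--     for line_index in range(0,len(arr)):
--         line = arr[line_index]
--         if line_index in subtitle_index_arr:
--             while "  " in line:
--                 line = line.replace("  ", " ")
--         modified_arr.append(line)
--     return modified_arr
-- ===== SOURCE B (Python) =====
-- def remove_double_space(arr, subtitle_index_arr):
--     selected = set(subtitle_index_arr)
--     out = []
--     for i, line in enumerate(arr):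
--         if i in selected:
--             chars = []
--             for ch in line:
--                 if ch == ' ' and chars and chars[-1] == ' ':
--                     continue
--                 chars.append(ch)
--             line = ''.join(chars)
--         out.append(line)
--     return out
-- ===== Notes on version B (the rewrite author's own statement) =====
-- stated objective: faster
-- what changed: Replaces the repeated full-string replace(' ',' ') fixpoint loop with a single left-to-right character scan that skips a space whenever the previously emitted character is a space (and a set for index membership).
import Mathlib
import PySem

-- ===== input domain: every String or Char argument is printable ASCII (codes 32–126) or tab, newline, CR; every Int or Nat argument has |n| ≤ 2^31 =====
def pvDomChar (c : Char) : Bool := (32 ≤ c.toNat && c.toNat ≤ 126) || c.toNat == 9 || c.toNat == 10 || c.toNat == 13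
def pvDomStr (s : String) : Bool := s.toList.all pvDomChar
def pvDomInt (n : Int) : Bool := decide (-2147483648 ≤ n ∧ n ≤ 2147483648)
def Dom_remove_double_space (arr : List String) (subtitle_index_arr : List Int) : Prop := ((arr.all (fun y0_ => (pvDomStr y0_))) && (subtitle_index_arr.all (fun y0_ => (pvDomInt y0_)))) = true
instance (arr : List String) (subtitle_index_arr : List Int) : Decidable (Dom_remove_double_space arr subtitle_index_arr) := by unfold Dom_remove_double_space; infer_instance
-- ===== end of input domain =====

-- B replaces A's repeated replace("  "," ") fixpoint loop by a single left-to-right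
-- character scan (skip a space when the last emitted char is a space); asymptotically faster per selected line.


-- ===== PORT A =====
-- helpers needed only so that A's `while "  " in line:` loop is well-founded:
-- repA mirrors PySem.Chars.replace.go for old = "  ", new = " " and is used for the termination bound.
def repA (l : List Char) : List Char :=
  match l with
  | [] => []
  | c :: t =>
      if [' ', ' '].isPrefixOf (c :: t) then ' ' :: repA (List.drop 2 (c :: t))
      else c :: repA t
termination_by l.length
decreasing_by
  · simp
  · simp

theorem repA_le (l : List Char) : (repA l).length ≤ l.length := by
  induction l using repA.induct with
  | case1 => simp [repA]
  | case2 c t hp ih =>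
      rw [repA]; simp only [hp, if_true]
      simp at ih ⊢; omega
  | case3 c t hp ih =>
      rw [repA]; simp only [hp]
      simpa using ih

theorem repA_go_eq (fuel : Nat) : ∀ (l acc : List Char), l.length ≤ fuel →
    PySem.Chars.replace.go [' ', ' '] [' '] fuel l acc = acc.reverse ++ repA l := by
  induction fuel with
  | zero =>
      intro l acc h
      have : l = [] := List.eq_nil_of_length_eq_zero (Nat.le_zero.mp h)
      subst this
      simp [PySem.Chars.replace.go, repA]
  | succ n ih =>
      intro l acc h
      cases l with
      | nil => simp [PySem.Chars.replace.go, repA]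
      | cons c t =>
          by_cases hp : [' ', ' '].isPrefixOf (c :: t) = true
          · have hlen : (c :: t).length = t.length + 1 := rfl
            rw [PySem.Chars.replace.go]
            simp only [hp, if_true]
            rw [ih (List.drop [' ', ' '].length (c :: t)) ([' '].reverse ++ acc) (by simp at h ⊢; omega)]
            rw [repA]
            simp [hp]
          · rw [PySem.Chars.replace.go]
            simp only [hp]
            rw [ih t (c :: acc) (by simp at h; omega)]
            rw [repA]
            simp [hp]

theorem replace_eq_repA (l : List Char) :
    PySem.Chars.replace l [' ', ' '] [' '] = repA l := by
  rw [PySem.Chars.replace]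
  simp only [List.isEmpty_cons, if_false, Bool.false_eq_true]
  exact repA_go_eq l.length l [] le_rfl

theorem repA_length_lt : ∀ (l : List Char), [' ', ' '] <:+: l → (repA l).length < l.length := by
  intro l
  induction l using repA.induct with
  | case1 => intro h; exact absurd (List.eq_nil_of_infix_nil h) (by simp)
  | case2 c t hp _ =>
      intro _
      rw [repA]; simp only [hp, if_true]
      have hle := repA_le (List.drop 2 (c :: t))
      have ht : t ≠ [] := by
        intro he; subst he
        have := (List.isPrefixOf_iff_prefix.mp hp).length_le
        simp at this
      cases t with
      | nil => exact absurd rfl ht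
      | cons d u =>
          have hd2 : List.drop 2 (c :: d :: u) = u := rfl
          rw [hd2] at hle ⊢
          simp only [List.length_cons]
          omega
  | case3 c t hp ih =>
      intro hinf
      rw [repA]; simp only [hp]
      have : [' ', ' '] <:+: t := by
        rcases List.infix_cons_iff.mp hinf with h | h
        · exact absurd (List.isPrefixOf_iff_prefix.mpr h) (by simpa using hp)
        · exact h
      simpa using ih this

-- fixA is the literal port of A's `while "  " in line: line = line.replace("  ", " ")`
-- (A works on a Python str; PySem.Str.* are thin wrappers over PySem.Chars.* on toList, so the loop is ported on the char list)
def fixA (l : List Char) : List Char :=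
  if PySem.Chars.isIn [' ', ' '] l then fixA (PySem.Chars.replace l [' ', ' '] [' ']) else l
termination_by l.length
decreasing_by
  rw [replace_eq_repA]
  exact repA_length_lt l ((PySem.Chars.isIn_iff_infix _ _).mp (by assumption))

def remove_double_space (arr : List String) (subtitle_index_arr : List Int) : List String :=
  (PySem.List.pyRange 0 (arr.length : Int) 1).foldl (fun modified_arr line_index =>
    let line := PySem.List.pyGetD arr line_index ""
    let line := if line_index ∈ subtitle_index_arr then String.mk (fixA line.toList) else line
    modified_arr ++ [line]) []

-- ===== PORT B =====
-- one left-to-right scan: append each char, but drop a space whose previously emitted char is a space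
def collapseB (l : List Char) : List Char :=
  l.foldl (fun chars ch =>
    if ch = ' ' ∧ chars.getLast? = some ' ' then chars else chars ++ [ch]) []

def remove_double_space_alt (arr : List String) (subtitle_index_arr : List Int) : List String :=
  let selected := PySem.Set.ofList subtitle_index_arr
  (PySem.List.enumerate arr 0).foldl (fun out p =>
    let line := if p.1 ∈ selected then String.mk (collapseB p.2.toList) else p.2
    out ++ [line]) []

-- ===== PRECONDITION & SPEC =====
def Spec_remove_double_space (arr : List String) (subtitle_index_arr : List Int) (out : List String) : Prop := out = remove_double_space_alt arr subtitle_index_arr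
instance (arr : List String) (subtitle_index_arr : List Int) (out : List String) : Decidable (Spec_remove_double_space arr subtitle_index_arr out) := by unfold Spec_remove_double_space; infer_instance

-- ===== CLAIM (what is proved, stated in full; the proofs are below) =====
def Claim_equal_remove_double_space : Prop := ∀ (arr : List String) (subtitle_index_arr : List Int), Dom_remove_double_space arr subtitle_index_arr → Spec_remove_double_space arr subtitle_index_arr (remove_double_space arr subtitle_index_arr)

-- ===== LEMMAS AND PROOFS =====

-- the common spec of both collapsers: flag b = "the previously emitted character was a space"
def colAux (b : Bool) (l : List Char) : List Char :=
  match l with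
  | [] => []
  | c :: t => if c = ' ' && b then colAux true t else c :: colAux (c == ' ') t

theorem colAux_true_eq_false (t : List Char) (h : t.head? ≠ some ' ') :
    colAux true t = colAux false t := by
  cases t with
  | nil => rfl
  | cons c u =>
      have hc : c ≠ ' ' := by simpa using h
      simp [colAux, hc]

theorem colAux_id (l : List Char) (h : ¬ ([' ', ' '] <:+: l)) : colAux false l = l := by
  induction l with
  | nil => rfl
  | cons c t ih =>
      have ht : ¬ ([' ', ' '] <:+: t) := fun hh => h (List.infix_cons hh)
      by_cases hc : c = ' '
      · subst hc
        have hhd : t.head? ≠ some ' ' := by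
          intro hh
          cases t with
          | nil => simp at hh
          | cons d u =>
              simp at hh; subst hh
              exact h ((List.prefix_cons_inj _).mpr (List.cons_prefix_cons.mpr ⟨rfl, List.nil_prefix⟩)).isInfix
        have h1 : colAux false (' ' :: t) = ' ' :: colAux true t := by simp [colAux]
        rw [h1, colAux_true_eq_false t hhd, ih ht]
      · have h2 : (c == ' ') = false := by simp [hc]
        simp [colAux, hc, h2, ih ht]

theorem colAux_repA : ∀ (l : List Char) (b : Bool), colAux b (repA l) = colAux b l := by
  intro l
  induction l using repA.induct with
  | case1 => intro b; rw [repA]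
  | case2 c t hp ih =>
      intro b
      have hpre := List.isPrefixOf_iff_prefix.mp hp
      obtain ⟨u, hu⟩ := hpre
      cases t with
      | nil => simp at hu
      | cons d v =>
          have hc : c = ' ' := by simp at hu; tauto
          have hd : d = ' ' := by simp at hu; tauto
          subst hc; subst hd
          rw [repA]; simp only [hp, if_true]
          have hdrop : List.drop 2 (' ' :: ' ' :: v) = v := rfl
          rw [hdrop] at ih ⊢
          cases b with
          | true => simp [colAux, ih true]
          | false => simp [colAux, ih true]
  | case3 c t hp ih =>
      intro b
      rw [repA]; simp only [hp]
      by_cases hc : c = ' '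
      · subst hc
        cases b with
        | true => simp [colAux, ih true]
        | false => simp [colAux, ih true]
      · have h2 : (c == ' ') = false := by simp [hc]
        simp [colAux, hc, h2, ih false]

theorem fixA_eq_colAux (l : List Char) : fixA l = colAux false l := by
  induction l using fixA.induct with
  | case1 l hin ih =>
      rw [fixA, if_pos hin, ih, replace_eq_repA, colAux_repA]
  | case2 l hin =>
      rw [fixA, if_neg hin]
      exact (colAux_id l ((PySem.Chars.isIn_eq_false_iff _ _).mp (by simpa using hin))).symm

theorem collapseB_foldl (l : List Char) : ∀ acc : List Char,
    l.foldl (fun chars ch =>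
      if ch = ' ' ∧ chars.getLast? = some ' ' then chars else chars ++ [ch]) acc
    = acc ++ colAux (acc.getLast? == some ' ') l := by
  induction l with
  | nil => intro acc; simp [colAux]
  | cons c t ih =>
      intro acc
      simp only [List.foldl_cons]
      by_cases hc : c = ' ' ∧ acc.getLast? = some ' '
      · rw [if_pos hc, ih acc]
        obtain ⟨hc1, hc2⟩ := hc
        subst hc1
        simp [colAux, hc2]
      · rw [if_neg hc, ih (acc ++ [c])]
        have hl : (acc ++ [c]).getLast? = some c := by simp
        rw [hl]
        have : colAux (acc.getLast? == some ' ') (c :: t)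
            = c :: colAux (c == ' ') t := by
          rw [colAux]
          have : ¬ (c = ' ' ∧ (acc.getLast? == some ' ') = true) := by
            simpa using hc
          by_cases h1 : c = ' '
          · have h2 : (acc.getLast? == some ' ') = false := by
              cases h3 : (acc.getLast? == some ' ') with
              | false => rfl
              | true => exact absurd ⟨h1, h3⟩ this
            simp [h1, h2]
          · simp [h1]
        rw [this]
        simp

theorem collapseB_eq_colAux (l : List Char) : collapseB l = colAux false l := by
  rw [collapseB, collapseB_foldl l []]
  simp

theorem fixA_eq_collapseB (l : List Char) : fixA l = collapseB l := by
  rw [fixA_eq_colAux, collapseB_eq_colAux]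

-- ===== VERDICT (by name: the statement is the Claim_ definition above) =====
theorem remove_double_space_spec : Claim_equal_remove_double_space := by
  unfold Claim_equal_remove_double_space
  intro arr subtitle_index_arr _
  unfold Spec_remove_double_space remove_double_space remove_double_space_alt
  rw [PySem.List.foldl_append_singleton_eq_map, PySem.List.foldl_append_singleton_eq_map]
  rw [PySem.List.enumerate_eq_map_pyRange (d := "")]
  rw [List.map_map]
  simp only [List.nil_append, PySem.List.len_eq]
  apply List.map_congr_left
  intro i _
  simp only [Function.comp]
  rw [fixA_eq_collapseB]
  simp [PySem.Set.mem_ofList]
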